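-- pv_equiv track=rewrite | github.com/andrenbrandao/cracking-the-coding-interview | 5-bit-manipulation/4-next-number/solution.py | next_number
-- ===== SOURCE A (Python) =====
-- def next_number(number):
--     count_1s = count_1_bits(number)
--
--     min_number = 0
--     count = count_1s
--     while count > 0:
--         min_number = min_number << 1
--         min_number += 1
--         count -= 1
--
--     shift_times = 64 - count_1s - 1
--     max_number = min_number
--     while shift_times > 0:
--         max_number = max_number << 1
--         shift_times -= 1
--
--     return [min_number, max_number]
--
-- def count_1_bits(number):
--     count = 0
--
--     while number != 0:
--         if number & 1:
--             count += 1
--         number = number >> 1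
--     return count
-- ===== SOURCE B (Python) =====
-- def next_number(number):
--     # Single fused pass over the bits: no separate popcount and no rebuild
--     # loops.  Each set bit, as it is found, is packed low into min_number
--     # (at the next free low position) and pushed into the top of the 64-bit
--     # word for max_number (shift the top block right, add bit 62).
--     min_number = 0
--     max_number = 0
--     rank = 0
--     n = number
--     while n != 0:
--         if n & 1:
--             min_number += 1 << rank
--             rank += 1
--             max_number = (max_number >> 1) + (1 << 62)
--         n >>= 1
--     return [min_number, max_number]
-- ===== Notes on version B (the rewrite author's own statement) =====
-- stated objective: alternative
-- what changed: A's three staged loops (popcount, then build min bit-by-bit, then shift min up 64-count-1 times) are replaced by one fused pass over the input's bits that accumulates min and max simultaneously: each set bit found is packed at the next free low position of min and pushed into the top of the 64-bit word for max (max = (max >> 1) + (1 << 62)); no popcount helper remains.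
import Mathlib
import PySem

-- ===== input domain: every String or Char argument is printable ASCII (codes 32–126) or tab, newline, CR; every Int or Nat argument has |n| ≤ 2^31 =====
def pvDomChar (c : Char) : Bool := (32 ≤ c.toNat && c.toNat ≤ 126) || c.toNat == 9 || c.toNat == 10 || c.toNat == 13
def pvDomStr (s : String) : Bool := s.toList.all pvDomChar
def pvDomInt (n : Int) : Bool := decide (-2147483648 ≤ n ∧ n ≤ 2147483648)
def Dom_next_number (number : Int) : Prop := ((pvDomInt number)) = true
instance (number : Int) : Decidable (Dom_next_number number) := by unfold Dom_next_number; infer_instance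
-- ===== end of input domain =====

-- B fuses A's three loops into one pass over the bits that builds min and max together (objective: alternative).


-- ===== PORT A =====
-- Python's count_1_bits loops 'while number != 0'; on negative input it never
-- terminates (number >> 1 stays -1), so those inputs lie outside Pre_ below.
-- The loop is rendered as structural recursion on a fuel of number.toNat + 1
-- steps, which exceeds the loop's iteration count for every number ≥ 0 (a
-- totality guard only).  'number & 1' is 'mod number 2 = 1' and 'number >> 1'
-- is 'floordiv number 2', exact Python semantics for every Int.
def count1Go : Nat → Int → Int
  | 0, _ => 0
  | fuel + 1, number =>
      if number = 0 then 0
      else (if PySem.Int.mod number 2 = 1 then 1 else 0) +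
           count1Go fuel (PySem.Int.floordiv number 2)

def count_1_bits (number : Int) : Int := count1Go (number.toNat + 1) number

-- first while-loop of A ('while count > 0'): it runs exactly count.toNat times
def buildMinLoop (min_number : Int) : Nat → Int
  | 0 => min_number
  | count + 1 => buildMinLoop ((min_number <<< (1 : Nat)) + 1) count

-- second while-loop of A ('while shift_times > 0'): exactly shift_times.toNat times
def shiftLoop (max_number : Int) : Nat → Int
  | 0 => max_number
  | t + 1 => shiftLoop (max_number <<< (1 : Nat)) t

def next_number (number : Int) : List Int :=
  let count_1s := count_1_bits number
  let min_number := buildMinLoop 0 count_1s.toNat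
  let max_number := shiftLoop min_number (64 - count_1s - 1).toNat
  [min_number, max_number]

-- ===== PORT B =====
-- Source B's single 'while n != 0' loop, rendered with the same fuel guard as A's
-- loop (n.toNat + 1 steps suffice for every n ≥ 0; negatives are outside
-- Pre_).  State = (n, min_number, max_number, rank).  'n & 1' → mod n 2 = 1,
-- 'n >> 1' and 'max_number >> 1' → floordiv _ 2 (exact Python semantics);
-- rank starts at 0 and is only incremented, so Nat is exact for '1 << rank'.
def altGo : Nat → Int → Int → Int → Nat → Int × Int
  | 0, _, mn, mx, _ => (mn, mx)
  | fuel + 1, n, mn, mx, rank =>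
      if n = 0 then (mn, mx)
      else if PySem.Int.mod n 2 = 1 then
        altGo fuel (PySem.Int.floordiv n 2) (mn + ((1 : Int) <<< rank))
          (PySem.Int.floordiv mx 2 + ((1 : Int) <<< (62 : Nat))) (rank + 1)
      else
        altGo fuel (PySem.Int.floordiv n 2) mn mx rank

def next_number_alt (number : Int) : List Int :=
  let r := altGo (number.toNat + 1) number 0 0 0
  [r.1, r.2]

-- ===== PRECONDITION & SPEC =====
-- A's count_1_bits never terminates on negative input (number >> 1 converges
-- to -1, never 0), so A returns exactly on 0 ≤ number.
def Pre_next_number (number : Int) : Prop := 0 ≤ number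
instance (number : Int) : Decidable (Pre_next_number number) := by unfold Pre_next_number; infer_instance
def pvWitness_next_number : Int := 5

def Spec_next_number (number : Int) (out : List Int) : Prop := out = next_number_alt number
instance (number : Int) (out : List Int) : Decidable (Spec_next_number number out) := by unfold Spec_next_number; infer_instance

-- ===== CLAIM =====
def Claim_equal_next_number : Prop := ∀ (number : Int), Dom_next_number number → Pre_next_number number → Spec_next_number number (next_number number)

-- ===== LEMMAS AND PROOFS =====

theorem buildMinLoop_eq (c : Nat) : ∀ m : Int, buildMinLoop m c = (m + 1) * 2 ^ c - 1 := by
  induction c with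
  | zero => intro m; simp [buildMinLoop]
  | succ c ih =>
      intro m
      rw [buildMinLoop, ih, Int.shiftLeft_eq, pow_succ]
      ring

theorem shiftLoop_eq (t : Nat) : ∀ m : Int, shiftLoop m t = m * 2 ^ t := by
  induction t with
  | zero => intro m; simp [shiftLoop]
  | succ t ih =>
      intro m
      rw [shiftLoop, ih, Int.shiftLeft_eq, pow_succ]
      ring

theorem count1Go_zero (fuel : Nat) : count1Go fuel 0 = 0 := by
  cases fuel <;> simp [count1Go]

theorem count1Go_nonneg (fuel : Nat) : ∀ n : Int, 0 ≤ count1Go fuel n := by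
  induction fuel with
  | zero => intro n; simp [count1Go]
  | succ fuel ih =>
      intro n
      rw [count1Go]
      have h1 := ih (PySem.Int.floordiv n 2)
      split_ifs <;> omega

-- popcount bound: 2^count ≤ 2n for n ≥ 1 (so count ≤ 32 on the domain)
theorem count1Go_pow_le (fuel : Nat) : ∀ n : Int, 1 ≤ n → n < fuel →
    (2 : Int) ^ (count1Go fuel n).toNat ≤ 2 * n := by
  induction fuel with
  | zero => intro n h1 h2; omega
  | succ fuel ih =>
      intro n h1 hf
      rw [count1Go, if_neg (by omega)]
      have hfd : PySem.Int.floordiv n 2 = n / 2 :=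
        PySem.Int.floordiv_eq_ediv_of_pos (by omega)
      by_cases hh : 1 ≤ n / 2
      · have hrec := ih (n / 2) hh (by omega)
        have hn0 := count1Go_nonneg fuel (n / 2)
        have hhalf : 2 * (n / 2) ≤ n := by omega
        split_ifs with hb
        · rw [hfd]
          have heq : ((1 + count1Go fuel (n / 2)).toNat) = (count1Go fuel (n / 2)).toNat + 1 := by
            omega
          rw [heq, pow_succ]
          linarith
        · rw [hfd]
          have heq : ((0 + count1Go fuel (n / 2)).toNat) = (count1Go fuel (n / 2)).toNat := by omega
          rw [heq]
          linarith
      · -- n = 1 (since 1 ≤ n and n / 2 < 1)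
        have hn1 : n = 1 := by omega
        subst hn1
        have h2 : (1 : Int) / 2 = 0 := by decide
        rw [hfd, h2]
        have hm : PySem.Int.mod (1 : Int) 2 = 1 := by decide
        rw [if_pos hm, count1Go_zero]
        norm_num

-- closed form for B's fused loop, tracking the invariant mx = 2^63 - 2^j
theorem altGo_eq (fuel : Nat) : ∀ (n mn : Int) (rank j : Nat), 0 ≤ n → n < fuel →
    (count1Go fuel n).toNat ≤ j → j ≤ 63 →
    altGo fuel n mn ((2 : Int) ^ 63 - 2 ^ j) rank =
      (mn + ((2 : Int) ^ (count1Go fuel n).toNat - 1) * 2 ^ rank,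
       (2 : Int) ^ 63 - 2 ^ (j - (count1Go fuel n).toNat)) := by
  induction fuel with
  | zero => intro n mn rank j h0 hf; omega
  | succ fuel ih =>
      intro n mn rank j h0 hf hcj hj63
      by_cases hz : n = 0
      · subst hz
        simp [altGo, count1Go]
      · rw [altGo, if_neg hz, count1Go, if_neg hz]
        have hfd : PySem.Int.floordiv n 2 = n / 2 :=
          PySem.Int.floordiv_eq_ediv_of_pos (by omega)
        have hrecnn := count1Go_nonneg fuel (n / 2)
        split_ifs with hb
        · -- odd step: rank, mn, mx all advance
          have hcnt : ((1 + count1Go fuel (n / 2)).toNat) = (count1Go fuel (n / 2)).toNat + 1 := by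
            omega
          have hj1 : 1 ≤ j := by
            rw [count1Go, if_neg hz, if_pos hb, hfd] at hcj
            omega
          have hmx : PySem.Int.floordiv ((2 : Int) ^ 63 - 2 ^ j) 2 + ((1 : Int) <<< (62 : Nat))
              = (2 : Int) ^ 63 - 2 ^ (j - 1) := by
            rw [PySem.Int.floordiv_eq_ediv_of_pos (by omega)]
            have h2j : (2 : Int) ^ j = 2 ^ (j - 1) * 2 := by
              conv_lhs => rw [show j = (j - 1) + 1 from by omega, pow_succ]
            have h63 : (2 : Int) ^ 63 = 2 * 2 ^ 62 := by norm_num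
            have hexp : (2 : Int) ^ 63 - 2 ^ j = 2 * ((2 : Int) ^ 62 - 2 ^ (j - 1)) := by
              rw [h2j, h63]; ring
            rw [hexp, Int.mul_ediv_cancel_left _ (by norm_num), Int.shiftLeft_eq]
            ring
          rw [hfd, hmx]
          have hcj' : (count1Go fuel (n / 2)).toNat ≤ j - 1 := by
            rw [count1Go, if_neg hz, if_pos hb, hfd] at hcj
            omega
          rw [ih (n / 2) _ (rank + 1) (j - 1) (by omega) (by omega) hcj' (by omega)]
          simp only [Prod.mk.injEq]
          constructor
          · rw [hcnt]
            simp only [Int.shiftLeft_eq, pow_succ]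
            ring
          · rw [hcnt,
              show j - 1 - (count1Go fuel (n / 2)).toNat
                  = j - ((count1Go fuel (n / 2)).toNat + 1) from by omega]
        · -- even step
          have hcnt : ((0 + count1Go fuel (n / 2)).toNat) = (count1Go fuel (n / 2)).toNat := by omega
          have hcj' : (count1Go fuel (n / 2)).toNat ≤ j := by
            rw [count1Go, if_neg hz, if_neg hb, hfd] at hcj
            omega
          rw [hfd, ih (n / 2) mn rank j (by omega) (by omega) hcj' hj63]
          rw [hcnt]

-- ===== VERDICT =====
theorem next_number_spec : Claim_equal_next_number := by
  intro number hdom hpre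
  show next_number number = next_number_alt number
  have hpre' : (0 : Int) ≤ number := hpre
  have hdom' : number ≤ 2147483648 := by
    unfold Dom_next_number pvDomInt at hdom
    simpa using (of_decide_eq_true hdom).2
  set fuel := number.toNat + 1 with hfuel
  have hflt : number < (fuel : Nat) := by omega
  set c := (count1Go fuel number).toNat with hc
  -- bound c ≤ 32 from number ≤ 2^31
  have hc63 : c ≤ 32 := by
    by_cases h1 : 1 ≤ number
    · have hb := count1Go_pow_le fuel number h1 hflt
      rw [← hc] at hb
      by_contra hgt
      have hmono : (2 : Int) ^ 33 ≤ 2 ^ c := by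
        apply pow_le_pow_right₀ (by norm_num)
        omega
      have h33 : (2 : Int) ^ 33 = 8589934592 := by norm_num
      omega
    · have hz : number = 0 := by omega
      subst hz
      simp [hc, count1Go_zero]
  have hnn := count1Go_nonneg fuel number
  have hcast : count1Go fuel number = (c : Int) := by omega
  -- evaluate B
  have hB := altGo_eq fuel number 0 0 63 hpre' hflt (by omega) (by omega)
  -- evaluate A
  have hmin : buildMinLoop 0 c = (2 : Int) ^ c - 1 := by
    rw [buildMinLoop_eq]; ring
  have hsh : ((64 : Int) - count1Go fuel number - 1).toNat = 63 - c := by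
    omega
  have h00 : (2 : Int) ^ 63 - 2 ^ 63 = 0 := by ring
  rw [h00, ← hc] at hB
  simp only [next_number, next_number_alt, count_1_bits, ← hfuel, ← hc, hmin, hsh,
    shiftLoop_eq, hB]
  have hsplit : (2 : Int) ^ c * 2 ^ (63 - c) = 2 ^ 63 := by
    rw [← pow_add]
    congr 1
    omega
  simp only [List.cons.injEq, and_true]
  constructor
  · ring
  · rw [sub_mul, hsplit, one_mul]
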